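-- pv_equiv track=rewrite | github.com/rngoie/Python_programs | Trans_Ballas_hammer.py | penaliteMax
-- ===== SOURCE A (Python) =====
-- def penaliteMax(L,C,Penal,taille1,taille2,absc,ordn):
--     maxim=-100
--     for i in range(0,taille1):
--         if L[i]==0:
--             if maxim<Penal[0][i]:
--                 maxim=Penal[0][i]
--                 absc=0
--                 ordn=i
--
--     for j in range(0,taille2):
--         if C[j]==0:
--             if maxim<Penal[1][j]:
--                 maxim=Penal[1][j]
--                 absc=1
--                 ordn=j
--
--     return  absc,ordn
-- ===== SOURCE B (Python) =====
-- def penaliteMax(L, C, Penal, taille1, taille2, absc, ordn):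
--     # phase 1: what is the best qualifying penalty value?
--     pens = [Penal[0][i] for i in range(taille1) if L[i] == 0]
--     pens += [Penal[1][j] for j in range(taille2) if C[j] == 0]
--     best = max(pens, default=-100)
--     if best <= -100:
--         return absc, ordn
--     # phase 2: locate its first position, rows before columns
--     for i in range(taille1):
--         if L[i] == 0 and Penal[0][i] == best:
--             return 0, i
--     for j in range(taille2):
--         if C[j] == 0 and Penal[1][j] == best:
--             return 1, j
--     return absc, ordn
-- ===== Notes on version B (the rewrite author's own statement) =====
-- stated objective: alternative
-- what changed: Replaces A's single pass that threads a (maxim,absc,ordn) best-so-far state by a two-phase algorithm: phase 1 computes only the best qualifying penalty value (filtered value lists + max with default -100), phase 2 is a separate search pass that returns the first position (rows before columns) holding that value; the unchanged default is returned when the best value is not strictly above -100.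
import Mathlib
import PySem

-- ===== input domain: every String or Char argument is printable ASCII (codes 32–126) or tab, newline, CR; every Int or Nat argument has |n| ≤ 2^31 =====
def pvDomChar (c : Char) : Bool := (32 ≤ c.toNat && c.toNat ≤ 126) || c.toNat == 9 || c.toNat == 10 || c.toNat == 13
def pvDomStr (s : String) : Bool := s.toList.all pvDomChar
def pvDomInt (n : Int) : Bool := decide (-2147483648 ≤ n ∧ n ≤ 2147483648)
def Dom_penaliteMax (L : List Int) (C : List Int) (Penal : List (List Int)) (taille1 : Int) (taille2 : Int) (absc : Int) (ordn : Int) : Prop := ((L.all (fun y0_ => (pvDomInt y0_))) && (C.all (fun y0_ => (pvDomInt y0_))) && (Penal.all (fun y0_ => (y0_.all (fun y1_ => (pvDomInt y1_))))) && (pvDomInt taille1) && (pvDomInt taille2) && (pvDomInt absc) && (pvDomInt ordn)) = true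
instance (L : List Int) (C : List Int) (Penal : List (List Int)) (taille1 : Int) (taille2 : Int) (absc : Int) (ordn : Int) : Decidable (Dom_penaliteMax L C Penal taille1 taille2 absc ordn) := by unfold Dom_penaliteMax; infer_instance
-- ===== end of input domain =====

-- B replaces A's single best-so-far state pass by a two-phase algorithm:
-- compute the best qualifying penalty value first, then search for its first
-- position (rows before columns) — "alternative" decomposition, same cost.

-- ===== PORT A =====
-- literal port: two range loops threading the (maxim, absc, ordn) state
def penaliteMax (L : List Int) (C : List Int) (Penal : List (List Int)) (taille1 : Int) (taille2 : Int) (absc : Int) (ordn : Int) : Int × Int :=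
  let s1 := (PySem.List.pyRange 0 taille1 1).foldl
    (fun (s : Int × Int × Int) i =>
      if PySem.List.pyGetD L i 0 = 0 then
        (if s.1 < PySem.List.pyGetD (PySem.List.pyGetD Penal 0 []) i 0 then
          (PySem.List.pyGetD (PySem.List.pyGetD Penal 0 []) i 0, (0 : Int), i)
         else s)
      else s) ((-100 : Int), absc, ordn)
  let s2 := (PySem.List.pyRange 0 taille2 1).foldl
    (fun (s : Int × Int × Int) j =>
      if PySem.List.pyGetD C j 0 = 0 then
        (if s.1 < PySem.List.pyGetD (PySem.List.pyGetD Penal 1 []) j 0 then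
          (PySem.List.pyGetD (PySem.List.pyGetD Penal 1 []) j 0, (1 : Int), j)
         else s)
      else s) s1
  (s2.2.1, s2.2.2)

-- ===== PORT B =====
-- phase 1 helpers: the list of qualifying penalty values of one axis, and
-- Python's max(pens, default=-100)
def pvPens (flags : List Int) (P : List Int) (n : Int) : List Int :=
  (PySem.List.pyRange 0 n 1).filterMap
    (fun i => if PySem.List.pyGetD flags i 0 = 0 then some (PySem.List.pyGetD P i 0) else none)

def pvBest (pens : List Int) : Int :=
  match pens with
  | [] => -100
  | x :: xs => xs.foldl max x

def penaliteMax_alt (L : List Int) (C : List Int) (Penal : List (List Int)) (taille1 : Int) (taille2 : Int) (absc : Int) (ordn : Int) : Int × Int :=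
  let P0 := PySem.List.pyGetD Penal 0 []
  let P1 := PySem.List.pyGetD Penal 1 []
  let best := pvBest (pvPens L P0 taille1 ++ pvPens C P1 taille2)
  if best ≤ -100 then (absc, ordn)
  else
    -- phase 2: first position holding the best value, rows before columns
    match (PySem.List.pyRange 0 taille1 1).find?
        (fun i => PySem.List.pyGetD L i 0 == 0 && PySem.List.pyGetD P0 i 0 == best) with
    | some i => (0, i)
    | none =>
      match (PySem.List.pyRange 0 taille2 1).find?
          (fun j => PySem.List.pyGetD C j 0 == 0 && PySem.List.pyGetD P1 j 0 == best) with
      | some j => (1, j)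
      | none => (absc, ordn)

-- ===== PRECONDITION & SPEC =====
-- Pre_ excludes exactly the inputs where Python A raises IndexError: a loop bound
-- beyond the flag list, or a zero flag whose penalty cell Penal[0][i]/Penal[1][j] is missing.
def Pre_penaliteMax (L : List Int) (C : List Int) (Penal : List (List Int)) (taille1 : Int) (taille2 : Int) (absc : Int) (ordn : Int) : Prop :=
  taille1 ≤ (L.length : Int) ∧ taille2 ≤ (C.length : Int) ∧
  (∀ i ∈ List.range taille1.toNat, L.getD i 1 = 0 → 1 ≤ Penal.length ∧ i < (Penal.getD 0 []).length) ∧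
  (∀ j ∈ List.range taille2.toNat, C.getD j 1 = 0 → 2 ≤ Penal.length ∧ j < (Penal.getD 1 []).length)
instance (L : List Int) (C : List Int) (Penal : List (List Int)) (taille1 : Int) (taille2 : Int) (absc : Int) (ordn : Int) : Decidable (Pre_penaliteMax L C Penal taille1 taille2 absc ordn) := by unfold Pre_penaliteMax; infer_instance

def pvWitness_penaliteMax : List Int × List Int × List (List Int) × Int × Int × Int × Int :=
  ([0, 1], [0], [[5, 2], [3]], 2, 1, 7, 8)

def Spec_penaliteMax (L : List Int) (C : List Int) (Penal : List (List Int)) (taille1 : Int) (taille2 : Int) (absc : Int) (ordn : Int) (out : Int × Int) : Prop := out = penaliteMax_alt L C Penal taille1 taille2 absc ordn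
instance (L : List Int) (C : List Int) (Penal : List (List Int)) (taille1 : Int) (taille2 : Int) (absc : Int) (ordn : Int) (out : Int × Int) : Decidable (Spec_penaliteMax L C Penal taille1 taille2 absc ordn out) := by unfold Spec_penaliteMax; infer_instance

-- ===== CLAIM (what is proved, stated in full; the proofs are below) =====
def Claim_equal_penaliteMax : Prop := ∀ (L : List Int) (C : List Int) (Penal : List (List Int)) (taille1 : Int) (taille2 : Int) (absc : Int) (ordn : Int), Dom_penaliteMax L C Penal taille1 taille2 absc ordn → Pre_penaliteMax L C Penal taille1 taille2 absc ordn → Spec_penaliteMax L C Penal taille1 taille2 absc ordn (penaliteMax L C Penal taille1 taille2 absc ordn)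

-- ===== LEMMAS AND PROOFS =====

-- the "keep the strictly larger, first wins" step of A
def pvStep (s x : Int × Int × Int) : Int × Int × Int := if s.1 < x.1 then x else s

-- A's guarded loop body equals pvStep folded over the filtered candidate list
theorem pv_fold_filter (p : Int → Prop) [DecidablePred p] (g : Int → Int × Int × Int) :
    ∀ (l : List Int) (s : Int × Int × Int),
      l.foldl (fun s i => if p i then pvStep s (g i) else s) s
        = (l.filterMap (fun i => if p i then some (g i) else none)).foldl pvStep s := by
  intro l
  induction l with
  | nil => intro s; simp
  | cons x l ih =>
    intro s
    by_cases h : p x <;> simp [h, ih]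

theorem pv_le_fold_max : ∀ (l : List Int) (a : Int), a ≤ l.foldl max a := by
  intro l
  induction l with
  | nil => intro a; simp
  | cons x l ih =>
    intro a
    exact le_trans (le_max_left a x) (ih (max a x))

theorem pv_fold_max_init : ∀ (l : List Int) (a c : Int),
    l.foldl max (max a c) = max a (l.foldl max c) := by
  intro l
  induction l with
  | nil => intro a c; simp
  | cons x l ih =>
    intro a c
    simp only [List.foldl_cons, max_assoc, ih]

-- when the max exceeds the seed, some element attains it
theorem pv_find_isSome : ∀ (cs : List (Int × Int × Int)) (a b : Int),
    (cs.map Prod.fst).foldl max a = b → a < b →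
    (cs.find? (fun t => t.1 == b)).isSome := by
  intro cs
  induction cs with
  | nil => intro a b hb ha; simp at hb; omega
  | cons x cs ih =>
    intro a b hb ha
    by_cases hx : x.1 = b
    · simp [List.find?_cons, hx]
    · simp only [List.map_cons, List.foldl_cons] at hb
      have h1 : max a x.1 ≤ b := by rw [← hb]; exact pv_le_fold_max _ _
      have : (cs.find? (fun t => t.1 == b)).isSome :=
        ih (max a x.1) b hb (by simp only [max_lt_iff]; omega)
      simpa [List.find?_cons, hx] using this

-- characterisation of A's single pass: it returns the first element attaining
-- the maximum penalty, when that maximum beats the seed, and the seed otherwise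
theorem pv_fold_char : ∀ (cs : List (Int × Int × Int)) (s : Int × Int × Int) (b : Int),
    (cs.map Prod.fst).foldl max s.1 = b →
    cs.foldl pvStep s =
      (if s.1 < b then (cs.find? (fun t => t.1 == b)).getD s else s) := by
  intro cs
  induction cs with
  | nil =>
    intro s b hb ; simp at hb ; subst hb ; simp
  | cons x cs ih =>
    intro s b hb
    simp only [List.map_cons, List.foldl_cons] at hb
    have hxb : max s.1 x.1 ≤ b := by rw [← hb]; exact pv_le_fold_max _ _
    simp only [List.foldl_cons]
    by_cases h : s.1 < x.1
    · rw [show pvStep s x = x from if_pos h]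
      have hb' : (cs.map Prod.fst).foldl max x.1 = b := by
        rwa [show max s.1 x.1 = x.1 from max_eq_right (le_of_lt h)] at hb
      rw [ih x b hb']
      have hsb : s.1 < b := by simp only [max_le_iff] at hxb; omega
      rw [if_pos hsb]
      by_cases hxeq : x.1 = b
      · rw [if_neg (by omega)]
        simp [List.find?_cons, hxeq]
      · have hxlt : x.1 < b := by simp only [max_le_iff] at hxb; omega
        rw [if_pos hxlt]
        have hs := pv_find_isSome cs x.1 b hb' hxlt
        obtain ⟨t, ht⟩ := Option.isSome_iff_exists.mp hs
        simp [List.find?_cons, hxeq, ht]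
    · rw [show pvStep s x = s from if_neg h]
      have hb' : (cs.map Prod.fst).foldl max s.1 = b := by
        rwa [show max s.1 x.1 = s.1 from max_eq_left (by omega)] at hb
      rw [ih s b hb']
      by_cases hsb : s.1 < b
      · have hxne : x.1 ≠ b := by omega
        simp [List.find?_cons, hxne, hsb]
      · simp [hsb]

-- find? through the candidate-building filterMap
theorem pv_find_filterMap (p : Int → Prop) [DecidablePred p] (g : Int → Int × Int × Int) (b : Int) :
    ∀ (l : List Int),
      ((l.filterMap (fun i => if p i then some (g i) else none)).find? (fun t => t.1 == b))
        = (l.find? (fun i => decide (p i ∧ (g i).1 = b))).map g := by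
  intro l
  induction l with
  | nil => simp
  | cons x l ih =>
    by_cases hp : p x
    · by_cases hgb : (g x).1 = b
      · simp [List.find?_cons, hp, hgb]
      · simp [List.find?_cons, hp, hgb, ih]
    · simp [List.find?_cons, hp, ih]

-- pens of B = first components of A's candidates
theorem pv_map_fst (p : Int → Prop) [DecidablePred p] (g : Int → Int × Int × Int) (l : List Int) :
    (l.filterMap (fun i => if p i then some (g i) else none)).map Prod.fst
      = l.filterMap (fun i => if p i then some (g i).1 else none) := by
  rw [List.map_filterMap]
  congr 1
  funext i
  by_cases hp : p i <;> simp [hp]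

theorem pv_foldl_max_pvBest (pens : List Int) :
    pens.foldl max (-100) = max (-100) (pvBest pens) := by
  cases pens with
  | nil => simp [pvBest]
  | cons x xs =>
    simp only [pvBest, List.foldl_cons]
    have := pv_fold_max_init xs (-100) x
    simpa using this

-- ===== VERDICT (by name: the statement is the Claim_ definition above) =====
theorem penaliteMax_spec : Claim_equal_penaliteMax := by
  intro L C Penal taille1 taille2 absc ordn _ _
  unfold Spec_penaliteMax penaliteMax penaliteMax_alt
  have h1 := pv_fold_filter (fun i => PySem.List.pyGetD L i 0 = 0)
      (fun i => (PySem.List.pyGetD (PySem.List.pyGetD Penal 0 []) i 0, (0 : Int), i))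
      (PySem.List.pyRange 0 taille1 1) ((-100 : Int), absc, ordn)
  have h2 := pv_fold_filter (fun j => PySem.List.pyGetD C j 0 = 0)
      (fun j => (PySem.List.pyGetD (PySem.List.pyGetD Penal 1 []) j 0, (1 : Int), j))
      (PySem.List.pyRange 0 taille2 1)
  simp only [pvStep] at h1 h2
  simp only [h1, h2, ← List.foldl_append]
  set P0 := PySem.List.pyGetD Penal 0 [] with hP0
  set P1 := PySem.List.pyGetD Penal 1 [] with hP1
  set cs0 := (PySem.List.pyRange 0 taille1 1).filterMap
      (fun i => if PySem.List.pyGetD L i 0 = 0 then some ((PySem.List.pyGetD P0 i 0, (0 : Int), i)) else none) with hcs0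
  set cs1 := (PySem.List.pyRange 0 taille2 1).filterMap
      (fun j => if PySem.List.pyGetD C j 0 = 0 then some ((PySem.List.pyGetD P1 j 0, (1 : Int), j)) else none) with hcs1
  -- relate B's pens / best to the candidate list
  have hpens : (cs0 ++ cs1).map Prod.fst = pvPens L P0 taille1 ++ pvPens C P1 taille2 := by
    simp only [List.map_append, hcs0, hcs1,
      pv_map_fst (fun i => PySem.List.pyGetD L i 0 = 0) (fun i => (PySem.List.pyGetD P0 i 0, (0 : Int), i)),
      pv_map_fst (fun j => PySem.List.pyGetD C j 0 = 0) (fun j => (PySem.List.pyGetD P1 j 0, (1 : Int), j)),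
      pvPens]
  set best := pvBest (pvPens L P0 taille1 ++ pvPens C P1 taille2) with hbest
  have hb : ((cs0 ++ cs1).map Prod.fst).foldl max (-100) = max (-100) best := by
    rw [hpens, hbest, pv_foldl_max_pvBest]
  have hchar := pv_fold_char (cs0 ++ cs1) ((-100 : Int), absc, ordn) (max (-100) best) hb
  rw [show ((-100 : Int), absc, ordn).1 = (-100 : Int) from rfl] at hchar
  rw [hchar]
  by_cases hle : best ≤ -100
  · rw [if_neg (by simp; omega), if_pos hle]
  · have hmax : max (-100 : Int) best = best := max_eq_right (by omega)
    rw [hmax]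
    rw [if_pos (by omega), if_neg hle]
    have e0 : (fun i => PySem.List.pyGetD L i 0 == 0 && PySem.List.pyGetD P0 i 0 == best)
        = (fun i => decide (PySem.List.pyGetD L i 0 = 0 ∧ PySem.List.pyGetD P0 i 0 = best)) := by
      funext i; simp [Bool.decide_and, beq_eq_decide]
    have e1 : (fun j => PySem.List.pyGetD C j 0 == 0 && PySem.List.pyGetD P1 j 0 == best)
        = (fun j => decide (PySem.List.pyGetD C j 0 = 0 ∧ PySem.List.pyGetD P1 j 0 = best)) := by
      funext j; simp [Bool.decide_and, beq_eq_decide]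
    rw [e0, e1, List.find?_append, hcs0, hcs1,
        pv_find_filterMap (fun i => PySem.List.pyGetD L i 0 = 0) (fun i => (PySem.List.pyGetD P0 i 0, (0 : Int), i)) best,
        pv_find_filterMap (fun j => PySem.List.pyGetD C j 0 = 0) (fun j => (PySem.List.pyGetD P1 j 0, (1 : Int), j)) best]
    cases hf0 : (PySem.List.pyRange 0 taille1 1).find?
        (fun i => decide (PySem.List.pyGetD L i 0 = 0 ∧ PySem.List.pyGetD P0 i 0 = best)) with
    | some i => simp [hf0, Option.or]
    | none =>
      cases hf1 : (PySem.List.pyRange 0 taille2 1).find?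
          (fun j => decide (PySem.List.pyGetD C j 0 = 0 ∧ PySem.List.pyGetD P1 j 0 = best)) with
      | some j => simp [hf0, hf1, Option.or]
      | none => simp [hf0, hf1, Option.or]
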